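-- pv_equiv track=rewrite | github.com/hvkshetry/StewardOS | servers/investing-workspace/portfolio-analytics/drift.py | _infer_bucket_from_yfinance_metadata
-- ===== SOURCE A (Python) =====
-- from typing import Any
--
-- def _infer_bucket_from_yfinance_metadata(info: dict[str, Any]) -> str | None:
--     quote_type = str(info.get("quoteType", "") or info.get("instrumentType", "")).strip().upper()
--     fields = [
--         info.get("category"),
--         info.get("fundCategory"),
--         info.get("fundFamily"),
--         info.get("longName"),
--         info.get("shortName"),
--         info.get("sector"),
--         info.get("industry"),
--     ]
--     text = " | ".join(str(item).strip().lower() for item in fields if item is not None and str(item).strip())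
--
--     if any(term in text for term in {"money market", "cash reserve", "cash management", "ultra short treasury"}):
--         return "LIQUIDITY:CASH"
--
--     if any(term in text for term in {"municipal", "muni", "tax-exempt", "tax free"}):
--         return "FIXED_INCOME:MUNICIPAL"
--
--     if any(term in text for term in {"high yield", "high-yield", "junk bond"}):
--         return "FIXED_INCOME:HIGH_YIELD"
--
--     if any(term in text for term in {"tips", "inflation protected", "inflation-protected"}):
--         return "FIXED_INCOME:TIPS"
--
--     if any(term in text for term in {"bond", "fixed income", "treasury", "intermediate term"}):
--         return "FIXED_INCOME:AGGREGATE"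
--
--     if any(term in text for term in {"real estate", "reit", "real assets"}):
--         return "EQUITY:REAL_ESTATE"
--
--     if any(term in text for term in {"emerging", "em ex", "emerging markets"}):
--         return "EQUITY:EMERGING_MARKETS"
--
--     if any(term in text for term in {"international", "developed", "foreign", "ex-us", "all-world ex-us"}):
--         return "EQUITY:INTERNATIONAL_DEVELOPED"
--
--     if any(term in text for term in {"small cap", "small-cap", "smid", "mid cap", "mid-cap"}):
--         return "EQUITY:US_SMALL_CAP"
--
--     if quote_type in {"MUTUALFUND", "ETF", "EQUITY", "STOCK"}:
--         return "EQUITY:US_LARGE_BLEND"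
--     return None
-- ===== SOURCE B (Python) =====
-- # Different algorithm: dissolve the nine ordered group checks into one flat
-- # term -> (priority, label) map and a single arg-min scan over all terms
-- # (no early return, no group-by-group dispatch). Correct because terms are
-- # distinct across groups and the first matching group is exactly the minimum
-- # priority among all matching terms.
--
-- _RULES = [
--     (("money market", "cash reserve", "cash management", "ultra short treasury"), "LIQUIDITY:CASH"),
--     (("municipal", "muni", "tax-exempt", "tax free"), "FIXED_INCOME:MUNICIPAL"),
--     (("high yield", "high-yield", "junk bond"), "FIXED_INCOME:HIGH_YIELD"),
--     (("tips", "inflation protected", "inflation-protected"), "FIXED_INCOME:TIPS"),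
--     (("bond", "fixed income", "treasury", "intermediate term"), "FIXED_INCOME:AGGREGATE"),
--     (("real estate", "reit", "real assets"), "EQUITY:REAL_ESTATE"),
--     (("emerging", "em ex", "emerging markets"), "EQUITY:EMERGING_MARKETS"),
--     (("international", "developed", "foreign", "ex-us", "all-world ex-us"), "EQUITY:INTERNATIONAL_DEVELOPED"),
--     (("small cap", "small-cap", "smid", "mid cap", "mid-cap"), "EQUITY:US_SMALL_CAP"),
-- ]
--
-- _TERM_RULE = {t: (i, label) for i, (terms, label) in enumerate(_RULES) for t in terms}
--
-- _FIELD_KEYS = ("category", "fundCategory", "fundFamily", "longName", "shortName", "sector", "industry")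
--
--
-- def _infer_bucket_from_yfinance_metadata(info):
--     quote_type = str(info.get("quoteType", "") or info.get("instrumentType", "")).strip().upper()
--     fields = [info.get(k) for k in _FIELD_KEYS]
--     text = " | ".join(str(item).strip().lower() for item in fields if item is not None and str(item).strip())
--     best = None
--     for term, (prio, label) in _TERM_RULE.items():
--         if term in text and (best is None or prio < best[0]):
--             best = (prio, label)
--     if best is not None:
--         return best[1]
--     if quote_type in {"MUTUALFUND", "ETF", "EQUITY", "STOCK"}:
--         return "EQUITY:US_LARGE_BLEND"
--     return None
-- ===== Notes on version B (the rewrite author's own statement) =====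
-- stated objective: alternative
-- what changed: Replaces the nine ordered early-return group checks with one flat term->(priority,label) map and a single arg-min scan over all 34 terms that keeps the lowest-priority matching term; the quote_type fallback fires only when no term matched.
import Mathlib
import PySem

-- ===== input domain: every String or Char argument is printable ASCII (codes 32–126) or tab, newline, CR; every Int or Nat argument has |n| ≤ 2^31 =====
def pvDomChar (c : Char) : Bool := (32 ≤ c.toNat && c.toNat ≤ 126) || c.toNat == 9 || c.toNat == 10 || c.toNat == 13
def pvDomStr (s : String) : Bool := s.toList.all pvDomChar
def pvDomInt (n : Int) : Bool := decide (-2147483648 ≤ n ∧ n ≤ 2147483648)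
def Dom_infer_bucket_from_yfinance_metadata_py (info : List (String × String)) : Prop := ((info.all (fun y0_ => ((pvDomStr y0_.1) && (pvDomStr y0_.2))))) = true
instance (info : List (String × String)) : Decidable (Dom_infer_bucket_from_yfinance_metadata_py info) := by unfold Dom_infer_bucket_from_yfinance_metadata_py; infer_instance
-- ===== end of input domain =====

-- B replaces A's nine ordered early-return group checks by one flat term->(priority,label) map
-- scanned once with an arg-min accumulator (alternative algorithm; same cost).

-- ===== PORT A =====
-- literal transliteration of A: same text construction, then nine inline `if any(...)` branches in order
def infer_bucket_from_yfinance_metadata_py (info : List (String × String)) : Option String :=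
  let qt := PySem.Dict.getD (PySem.Dict.ofList info) "quoteType" ""
  -- Python `x or y` on strings: first operand if non-empty, else second
  let quote_type := PySem.Str.upper (PySem.Str.strip
    (if qt ≠ "" then qt else PySem.Dict.getD (PySem.Dict.ofList info) "instrumentType" ""))
  let fields := [PySem.Dict.get? (PySem.Dict.ofList info) "category", PySem.Dict.get? (PySem.Dict.ofList info) "fundCategory",
    PySem.Dict.get? (PySem.Dict.ofList info) "fundFamily", PySem.Dict.get? (PySem.Dict.ofList info) "longName",
    PySem.Dict.get? (PySem.Dict.ofList info) "shortName", PySem.Dict.get? (PySem.Dict.ofList info) "sector",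
    PySem.Dict.get? (PySem.Dict.ofList info) "industry"]
  let text := PySem.Str.join " | " (fields.filterMap (fun o => match o with
    | none => none
    | some s => if PySem.Str.strip s ≠ "" then some (PySem.Str.lower (PySem.Str.strip s)) else none))
  if ["money market", "cash reserve", "cash management", "ultra short treasury"].any (fun t => PySem.Str.isIn t text) then
    some "LIQUIDITY:CASH"
  else if ["municipal", "muni", "tax-exempt", "tax free"].any (fun t => PySem.Str.isIn t text) then
    some "FIXED_INCOME:MUNICIPAL"
  else if ["high yield", "high-yield", "junk bond"].any (fun t => PySem.Str.isIn t text) then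
    some "FIXED_INCOME:HIGH_YIELD"
  else if ["tips", "inflation protected", "inflation-protected"].any (fun t => PySem.Str.isIn t text) then
    some "FIXED_INCOME:TIPS"
  else if ["bond", "fixed income", "treasury", "intermediate term"].any (fun t => PySem.Str.isIn t text) then
    some "FIXED_INCOME:AGGREGATE"
  else if ["real estate", "reit", "real assets"].any (fun t => PySem.Str.isIn t text) then
    some "EQUITY:REAL_ESTATE"
  else if ["emerging", "em ex", "emerging markets"].any (fun t => PySem.Str.isIn t text) then
    some "EQUITY:EMERGING_MARKETS"
  else if ["international", "developed", "foreign", "ex-us", "all-world ex-us"].any (fun t => PySem.Str.isIn t text) then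
    some "EQUITY:INTERNATIONAL_DEVELOPED"
  else if ["small cap", "small-cap", "smid", "mid cap", "mid-cap"].any (fun t => PySem.Str.isIn t text) then
    some "EQUITY:US_SMALL_CAP"
  else if ["MUTUALFUND", "ETF", "EQUITY", "STOCK"].contains quote_type then
    some "EQUITY:US_LARGE_BLEND"
  else
    none

-- ===== PORT B =====
-- Source B's _RULES table
def pvRules : List (List String × String) :=
  [ (["money market", "cash reserve", "cash management", "ultra short treasury"], "LIQUIDITY:CASH"),
    (["municipal", "muni", "tax-exempt", "tax free"], "FIXED_INCOME:MUNICIPAL"),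
    (["high yield", "high-yield", "junk bond"], "FIXED_INCOME:HIGH_YIELD"),
    (["tips", "inflation protected", "inflation-protected"], "FIXED_INCOME:TIPS"),
    (["bond", "fixed income", "treasury", "intermediate term"], "FIXED_INCOME:AGGREGATE"),
    (["real estate", "reit", "real assets"], "EQUITY:REAL_ESTATE"),
    (["emerging", "em ex", "emerging markets"], "EQUITY:EMERGING_MARKETS"),
    (["international", "developed", "foreign", "ex-us", "all-world ex-us"], "EQUITY:INTERNATIONAL_DEVELOPED"),
    (["small cap", "small-cap", "smid", "mid cap", "mid-cap"], "EQUITY:US_SMALL_CAP") ]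

-- Source B's _TERM_RULE dict comprehension: flat (term, priority, label) entries in insertion order
-- (terms are distinct across groups, so the dict is exactly this flat association list)
def pvTermRule : List (String × Int × String) :=
  (PySem.List.enumerate pvRules).flatMap (fun p => p.2.1.map (fun t => (t, p.1, p.2.2)))

def pvFieldKeys : List String :=
  ["category", "fundCategory", "fundFamily", "longName", "shortName", "sector", "industry"]

-- one step of Source B's loop body: `if term in text and (best is None or prio < best[0]): best = (prio, label)`
def pvStep (text : String) (best : Option (Int × String)) (tr : String × Int × String) : Option (Int × String) :=
  if PySem.Str.isIn tr.1 text then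
    match best with
    | none => some tr.2
    | some b => if tr.2.1 < b.1 then some tr.2 else best
  else best

def infer_bucket_from_yfinance_metadata_py_alt (info : List (String × String)) : Option String :=
  let qt := PySem.Dict.getD (PySem.Dict.ofList info) "quoteType" ""
  let quote_type := PySem.Str.upper (PySem.Str.strip
    (if qt ≠ "" then qt else PySem.Dict.getD (PySem.Dict.ofList info) "instrumentType" ""))
  let fields := pvFieldKeys.map (fun k => PySem.Dict.get? (PySem.Dict.ofList info) k)
  let text := PySem.Str.join " | " (fields.filterMap (fun o => match o with
    | none => none
    | some s => if PySem.Str.strip s ≠ "" then some (PySem.Str.lower (PySem.Str.strip s)) else none))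
  let best := pvTermRule.foldl (pvStep text) none
  match best with
  | some b => some b.2
  | none =>
      if ["MUTUALFUND", "ETF", "EQUITY", "STOCK"].contains quote_type then
        some "EQUITY:US_LARGE_BLEND"
      else
        none

-- ===== PRECONDITION & SPEC =====
def Spec_infer_bucket_from_yfinance_metadata_py (info : List (String × String)) (out : Option String) : Prop := out = infer_bucket_from_yfinance_metadata_py_alt info
instance (info : List (String × String)) (out : Option String) : Decidable (Spec_infer_bucket_from_yfinance_metadata_py info out) := by unfold Spec_infer_bucket_from_yfinance_metadata_py; infer_instance

-- ===== CLAIM =====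
def Claim_equal_infer_bucket_from_yfinance_metadata_py : Prop := ∀ (info : List (String × String)), Dom_infer_bucket_from_yfinance_metadata_py info → Spec_infer_bucket_from_yfinance_metadata_py info (infer_bucket_from_yfinance_metadata_py info)

-- ===== LEMMAS AND PROOFS =====

-- once the accumulator holds priority p and every remaining entry has priority ≥ p, the fold is the identity
lemma pv_settle (text : String) (L : List (String × Int × String)) (p : Int) (lab : String)
    (h : ∀ e ∈ L, p ≤ e.2.1) :
    L.foldl (pvStep text) (some (p, lab)) = some (p, lab) := by
  induction L with
  | nil => rfl
  | cons e L ih =>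
    have hp : ¬ e.2.1 < p := not_lt.mpr (h e (List.mem_cons_self))
    have hstep : pvStep text (some (p, lab)) e = some (p, lab) := by
      unfold pvStep
      split_ifs with h1 <;> simp [hp]
    rw [List.foldl_cons, hstep]
    exact ih (fun e he => h e (List.mem_cons_of_mem _ he))

-- processing one group of terms (all at priority p, everything after at priority ≥ p)
lemma pv_group (text : String) (terms : List String) (p : Int) (lab : String)
    (rest : List (String × Int × String)) (h : ∀ e ∈ rest, p ≤ e.2.1) :
    (terms.map (fun t => (t, p, lab)) ++ rest).foldl (pvStep text) none =
      if terms.any (fun t => PySem.Str.isIn t text) then some (p, lab)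
      else rest.foldl (pvStep text) none := by
  induction terms with
  | nil => simp
  | cons t ts ih =>
    by_cases ht : PySem.Str.isIn t text
    · have hstep : pvStep text none (t, p, lab) = some (p, lab) := by
        unfold pvStep; rw [if_pos ht]
      have hts : ∀ e ∈ ts.map (fun t => (t, p, lab)) ++ rest, p ≤ e.2.1 := by
        intro e he
        rcases List.mem_append.mp he with h1 | h2
        · rcases List.mem_map.mp h1 with ⟨x, _, rfl⟩; simp
        · exact h e h2
      simp only [List.map_cons, List.cons_append, List.foldl_cons, hstep]
      rw [pv_settle text _ p lab hts]
      simp only [List.any_cons, ht, Bool.true_or, if_true]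
    · have hstep : pvStep text none (t, p, lab) = none := by
        unfold pvStep; rw [if_neg ht]
      simp only [List.map_cons, List.cons_append, List.foldl_cons, hstep]
      rw [ih]
      simp only [List.any_cons, eq_false_of_ne_true ht, Bool.false_or]

-- the flat arg-min scan equals A's priority-ordered if-chain
lemma pv_flat_eq (text : String) :
    pvTermRule.foldl (pvStep text) none =
      (if ["money market", "cash reserve", "cash management", "ultra short treasury"].any (fun t => PySem.Str.isIn t text) then
        some ((0 : Int), "LIQUIDITY:CASH")
      else if ["municipal", "muni", "tax-exempt", "tax free"].any (fun t => PySem.Str.isIn t text) then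
        some (1, "FIXED_INCOME:MUNICIPAL")
      else if ["high yield", "high-yield", "junk bond"].any (fun t => PySem.Str.isIn t text) then
        some (2, "FIXED_INCOME:HIGH_YIELD")
      else if ["tips", "inflation protected", "inflation-protected"].any (fun t => PySem.Str.isIn t text) then
        some (3, "FIXED_INCOME:TIPS")
      else if ["bond", "fixed income", "treasury", "intermediate term"].any (fun t => PySem.Str.isIn t text) then
        some (4, "FIXED_INCOME:AGGREGATE")
      else if ["real estate", "reit", "real assets"].any (fun t => PySem.Str.isIn t text) then
        some (5, "EQUITY:REAL_ESTATE")
      else if ["emerging", "em ex", "emerging markets"].any (fun t => PySem.Str.isIn t text) then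
        some (6, "EQUITY:EMERGING_MARKETS")
      else if ["international", "developed", "foreign", "ex-us", "all-world ex-us"].any (fun t => PySem.Str.isIn t text) then
        some (7, "EQUITY:INTERNATIONAL_DEVELOPED")
      else if ["small cap", "small-cap", "smid", "mid cap", "mid-cap"].any (fun t => PySem.Str.isIn t text) then
        some (8, "EQUITY:US_SMALL_CAP")
      else none) := by
  have h : pvTermRule =
      ["money market", "cash reserve", "cash management", "ultra short treasury"].map (fun t => (t, (0 : Int), "LIQUIDITY:CASH")) ++
      (["municipal", "muni", "tax-exempt", "tax free"].map (fun t => (t, (1 : Int), "FIXED_INCOME:MUNICIPAL")) ++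
      (["high yield", "high-yield", "junk bond"].map (fun t => (t, (2 : Int), "FIXED_INCOME:HIGH_YIELD")) ++
      (["tips", "inflation protected", "inflation-protected"].map (fun t => (t, (3 : Int), "FIXED_INCOME:TIPS")) ++
      (["bond", "fixed income", "treasury", "intermediate term"].map (fun t => (t, (4 : Int), "FIXED_INCOME:AGGREGATE")) ++
      (["real estate", "reit", "real assets"].map (fun t => (t, (5 : Int), "EQUITY:REAL_ESTATE")) ++
      (["emerging", "em ex", "emerging markets"].map (fun t => (t, (6 : Int), "EQUITY:EMERGING_MARKETS")) ++
      (["international", "developed", "foreign", "ex-us", "all-world ex-us"].map (fun t => (t, (7 : Int), "EQUITY:INTERNATIONAL_DEVELOPED")) ++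
      (["small cap", "small-cap", "smid", "mid cap", "mid-cap"].map (fun t => (t, (8 : Int), "EQUITY:US_SMALL_CAP")) ++
      ([] : List (String × Int × String)))))))))) := by decide
  rw [h, pv_group, pv_group, pv_group, pv_group, pv_group, pv_group, pv_group, pv_group, pv_group]
  all_goals first | rfl | decide

-- with text and quote_type abstract, A's if-chain equals B's match over the arg-min scan
lemma pv_bridge (text quote_type : String) :
    (if ["money market", "cash reserve", "cash management", "ultra short treasury"].any (fun t => PySem.Str.isIn t text) then
      some "LIQUIDITY:CASH"
    else if ["municipal", "muni", "tax-exempt", "tax free"].any (fun t => PySem.Str.isIn t text) then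
      some "FIXED_INCOME:MUNICIPAL"
    else if ["high yield", "high-yield", "junk bond"].any (fun t => PySem.Str.isIn t text) then
      some "FIXED_INCOME:HIGH_YIELD"
    else if ["tips", "inflation protected", "inflation-protected"].any (fun t => PySem.Str.isIn t text) then
      some "FIXED_INCOME:TIPS"
    else if ["bond", "fixed income", "treasury", "intermediate term"].any (fun t => PySem.Str.isIn t text) then
      some "FIXED_INCOME:AGGREGATE"
    else if ["real estate", "reit", "real assets"].any (fun t => PySem.Str.isIn t text) then
      some "EQUITY:REAL_ESTATE"
    else if ["emerging", "em ex", "emerging markets"].any (fun t => PySem.Str.isIn t text) then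
      some "EQUITY:EMERGING_MARKETS"
    else if ["international", "developed", "foreign", "ex-us", "all-world ex-us"].any (fun t => PySem.Str.isIn t text) then
      some "EQUITY:INTERNATIONAL_DEVELOPED"
    else if ["small cap", "small-cap", "smid", "mid cap", "mid-cap"].any (fun t => PySem.Str.isIn t text) then
      some "EQUITY:US_SMALL_CAP"
    else if ["MUTUALFUND", "ETF", "EQUITY", "STOCK"].contains quote_type then
      some "EQUITY:US_LARGE_BLEND"
    else
      none) =
    (match pvTermRule.foldl (pvStep text) none with
     | some b => some b.2
     | none =>
        if ["MUTUALFUND", "ETF", "EQUITY", "STOCK"].contains quote_type then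
          some "EQUITY:US_LARGE_BLEND"
        else
          none) := by
  rw [pv_flat_eq]
  split_ifs <;> rfl

-- ===== VERDICT =====
theorem infer_bucket_from_yfinance_metadata_py_spec : Claim_equal_infer_bucket_from_yfinance_metadata_py := by
  intro info _
  unfold Spec_infer_bucket_from_yfinance_metadata_py
  unfold infer_bucket_from_yfinance_metadata_py infer_bucket_from_yfinance_metadata_py_alt
  dsimp only
  simp only [pvFieldKeys, List.map_cons, List.map_nil]
  exact pv_bridge _ _
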